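-- pv_equiv track=rewrite | github.com/shahbaz181990/iNeuron_Assignments | Numpy_Assignment/Numpy_Assingment.py | numpy_assignment
-- ===== SOURCE A (Python) =====
-- def numpy_assignment(x, n):
--     # Counter Variable
--     temp = 0
--     # Final Array
--     ans = []
--     # Variable used to store the temp ans
--     gm_sum = 0
--     while temp < (len(x) - n + 1):
--         for i in range(n):
--             gm_sum += x[i]
--         final = gm_sum // n
--         ans.append(final)
--         x.append(x.pop(0))
--         temp += 1
--         gm_sum = 0
--     return ans
-- ===== SOURCE B (Python) =====
-- def numpy_assignment(x, n):
--     # O(len(x)) sliding-window: keep a running window sum, update it by one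
--     # add and one subtract per step.  Does not mutate x (A rotates x in place;
--     # the equivalence claimed is about the return value only).
--     if n <= 0 or n > len(x):
--         return []
--     s = sum(x[:n])
--     ans = [s // n]
--     for i in range(n, len(x)):
--         s += x[i] - x[i - n]
--         ans.append(s // n)
--     return ans
-- ===== Notes on version B (the rewrite author's own statement) =====
-- stated objective: faster
-- what changed: Replaces A's per-window re-summation over a rotated copy of the list with a single-pass incremental sliding sum (add the entering element, subtract the leaving one), and B does not mutate x.
-- outside the precondition, e.g. on numpy_assignment([1, 2], -1): A returns [0, 0, 0, 0], B returns []
import Mathlib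
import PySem

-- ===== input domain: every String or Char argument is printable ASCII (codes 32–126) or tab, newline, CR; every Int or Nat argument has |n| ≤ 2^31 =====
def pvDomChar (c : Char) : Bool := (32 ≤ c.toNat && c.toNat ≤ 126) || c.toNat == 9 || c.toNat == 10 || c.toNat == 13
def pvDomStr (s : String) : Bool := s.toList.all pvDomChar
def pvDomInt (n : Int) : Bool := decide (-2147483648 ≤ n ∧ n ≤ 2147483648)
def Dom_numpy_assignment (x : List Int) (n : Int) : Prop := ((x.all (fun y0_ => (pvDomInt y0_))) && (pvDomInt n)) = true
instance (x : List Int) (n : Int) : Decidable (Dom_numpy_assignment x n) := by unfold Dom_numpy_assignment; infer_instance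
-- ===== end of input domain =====

-- B replaces A's per-window re-summation over a rotated list by a one-pass incremental
-- sliding window sum.  A rotates x in place; B does not mutate x: the equivalence proved
-- is about the return value only.

-- ===== PORT A =====
-- while temp < len(x)-n+1: gm_sum = Σ x[i] for i in range(n); ans.append(gm_sum//n);
-- x.append(x.pop(0)); temp += 1.  The loop runs a fixed number of times (the length is
-- preserved by the rotation), so fuel x.length + n.natAbs + 1 bounds the iterations.
-- x[i] and x.pop(0) are ported with a default (pyGetD / headD 0); inside Pre_ (n ≥ 1)
-- the index is always in range and the popped list nonempty, where Python raises instead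
-- the input is outside Pre_.
def pvALoop (fuel : Nat) (x : List Int) (n : Int) (temp : Int) (ans : List Int) : List Int :=
  match fuel with
  | 0 => ans
  | Nat.succ fuel' =>
    if temp < (x.length : Int) - n + 1 then
      let gm_sum := (PySem.List.pyRange 0 n 1).foldl (fun s i => s + PySem.List.pyGetD x i 0) 0
      pvALoop fuel' (x.tail ++ [x.headD 0]) n (temp + 1) (ans ++ [PySem.Int.floordiv gm_sum n])
    else ans

def numpy_assignment (x : List Int) (n : Int) : List Int :=
  pvALoop (x.length + n.natAbs + 1) x n 0 []

-- ===== PORT B =====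
def numpy_assignment_alt (x : List Int) (n : Int) : List Int :=
  if n ≤ 0 ∨ (x.length : Int) < n then []
  else
    let s0 := (PySem.List.slice x none (some n)).sum
    ((PySem.List.pyRange n (x.length : Int) 1).foldl
      (fun (p : Int × List Int) i =>
        let s := p.1 + PySem.List.pyGetD x i 0 - PySem.List.pyGetD x (i - n) 0
        (s, p.2 ++ [PySem.Int.floordiv s n]))
      (s0, [PySem.Int.floordiv s0 n])).2

-- ===== PRECONDITION & SPEC =====
-- Pre_ restricts to positive window sizes n ≥ 1, the natural domain of window averaging:
-- at n = 0 A raises ZeroDivisionError and for n < 0 with empty x it raises IndexError,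
-- while for n < 0 with nonempty x neither A's list of zeros (from summing an empty range)
-- nor B's empty list is a specified behaviour.
def Pre_numpy_assignment (x : List Int) (n : Int) : Prop := 1 ≤ n
instance (x : List Int) (n : Int) : Decidable (Pre_numpy_assignment x n) := by
  unfold Pre_numpy_assignment; infer_instance
def pvWitness_numpy_assignment : List Int × Int := ([1, 2, 3], 2)

def Spec_numpy_assignment (x : List Int) (n : Int) (out : List Int) : Prop := out = numpy_assignment_alt x n
instance (x : List Int) (n : Int) (out : List Int) : Decidable (Spec_numpy_assignment x n out) := by unfold Spec_numpy_assignment; infer_instance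

-- ===== CLAIM (what is proved, stated in full; the proofs are below) =====
def Claim_equal_numpy_assignment : Prop := ∀ (x : List Int) (n : Int), Dom_numpy_assignment x n → Pre_numpy_assignment x n → Spec_numpy_assignment x n (numpy_assignment x n)

-- ===== LEMMAS AND PROOFS =====

-- the floor-averaged window of size nn starting at position t
def pvWin (x : List Int) (nn t : Nat) : Int :=
  PySem.Int.floordiv (((x.drop t).take nn).sum) (nn : Int)

theorem pvWindow_sum (x : List Int) (nn t : Nat) :
    ((x.drop t).take nn).sum = (x.take (t + nn)).sum - (x.take t).sum := by
  rw [List.take_add, List.sum_append]; ring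

theorem pvS_succ (x : List Int) (k : Nat) (hk : k < x.length) :
    (x.take (k + 1)).sum = (x.take k).sum + x[k] := by
  rw [List.take_add_one, List.sum_append]
  simp [List.getElem?_eq_getElem hk]

-- A's inner for-loop sums the first nn elements
theorem pvGm_aux (y : List Int) :
    ∀ (nn : Nat) (init : Int), nn ≤ y.length →
      (PySem.List.pyRange 0 (nn : Int) 1).foldl (fun s i => s + PySem.List.pyGetD y i 0) init
        = init + (y.take nn).sum := by
  intro nn
  induction nn with
  | zero => intro init _; simp [PySem.List.pyRange_one_eq_nil]
  | succ m ih =>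
    intro init h
    have hc : ((m + 1 : Nat) : Int) = (m : Int) + 1 := by push_cast; ring
    have hm : m < y.length := by omega
    rw [hc, PySem.List.pyRange_one_succ_right (by positivity), List.foldl_append, ih init (by omega)]
    rw [List.take_add_one, List.sum_append]
    simp [PySem.List.pyGetD_natCast, List.getD_eq_getElem?_getD, List.getElem?_eq_getElem hm]
    ring

-- one rotation x.append(x.pop(0)) of the t-times-rotated list
theorem pvRot (x : List Int) (t : Nat) (ht : t < x.length) :
    (x.drop t ++ x.take t).tail ++ [(x.drop t ++ x.take t).headD 0]
      = x.drop (t + 1) ++ x.take (t + 1) := by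
  rw [List.drop_eq_getElem_cons ht, List.cons_append, List.tail_cons, List.headD_cons,
    List.append_assoc, List.take_add_one]
  simp [List.getElem?_eq_getElem ht]

theorem pvALoop_stop (f : Nat) (y : List Int) (n temp : Int) (ans : List Int)
    (h : ¬ temp < (y.length : Int) - n + 1) : pvALoop f y n temp ans = ans := by
  cases f <;> simp [pvALoop, h]

-- A's while-loop, from the t-times-rotated state, appends one window average per step
theorem pvALoop_eq (x : List Int) (nn : Nat) (hnn : 1 ≤ nn) (hle : nn ≤ x.length) :
    ∀ (fuel t : Nat) (ans : List Int), t ≤ x.length - nn → x.length - nn - t + 1 ≤ fuel →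
      pvALoop fuel (x.drop t ++ x.take t) (nn : Int) (t : Int) ans
        = ans ++ (List.range' t (x.length - nn + 1 - t)).map (pvWin x nn) := by
  intro fuel
  induction fuel with
  | zero => intro t ans _ hf; omega
  | succ f ih =>
    intro t ans ht _
    have hlen : (x.drop t ++ x.take t).length = x.length := by
      simp; omega
    have hcond : (t : Int) < ((x.drop t ++ x.take t).length : Int) - (nn : Int) + 1 := by
      rw [hlen]; omega
    rw [pvALoop, if_pos hcond]
    have htl : t < x.length := by omega
    have hgm : (PySem.List.pyRange 0 (nn : Int) 1).foldl
        (fun s i => s + PySem.List.pyGetD (x.drop t ++ x.take t) i 0) 0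
        = ((x.drop t).take nn).sum := by
      rw [pvGm_aux _ nn 0 (by omega), List.take_append_of_le_length (by simp; omega)]
      ring
    simp only [hgm, pvRot x t htl]
    by_cases hlast : t < x.length - nn
    · have hc1 : ((t + 1 : Nat) : Int) = (t : Int) + 1 := by push_cast; ring
      rw [← hc1, ih (t + 1) _ (by omega) (by omega)]
      have hr : x.length - nn + 1 - t = (x.length - nn - t) + 1 := by omega
      rw [hr, List.range'_succ, List.map_cons]
      simp [pvWin]
    · have hteq : t = x.length - nn := by omega
      rw [pvALoop_stop _ _ _ _ _ (by simp; omega)]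
      have : x.length - nn + 1 - t = 1 := by omega
      rw [this]
      simp [List.range'_one, pvWin]

-- B's fold maintains (current window sum, window averages so far)
theorem pvBLoop_eq (x : List Int) (nn : Nat) (hnn : 1 ≤ nn) :
    ∀ (j : Nat), nn ≤ j → j ≤ x.length →
      ((PySem.List.pyRange (nn : Int) (j : Int) 1).foldl
        (fun (p : Int × List Int) i =>
          let s := p.1 + PySem.List.pyGetD x i 0 - PySem.List.pyGetD x (i - (nn : Int)) 0
          (s, p.2 ++ [PySem.Int.floordiv s (nn : Int)]))
        ((x.take nn).sum, [PySem.Int.floordiv ((x.take nn).sum) (nn : Int)]))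
      = (((x.drop (j - nn)).take nn).sum, (List.range (j - nn + 1)).map (pvWin x nn)) := by
  intro j hj hlen
  induction j, hj using Nat.le_induction with
  | base =>
    rw [PySem.List.pyRange_one_eq_nil (le_refl _)]
    simp [pvWin]
  | succ j hj ih =>
    have hjl : j < x.length := by omega
    have hc : ((j + 1 : Nat) : Int) = (j : Int) + 1 := by push_cast; ring
    rw [hc, PySem.List.pyRange_one_succ_right (by exact_mod_cast hj), List.foldl_append,
      ih (by omega)]
    have hd : (j : Int) - (nn : Int) = ((j - nn : Nat) : Int) := by omega
    have hjn : j - nn < x.length := by omega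
    have hs : ((x.drop (j - nn)).take nn).sum + PySem.List.pyGetD x (j : Int) 0
        - PySem.List.pyGetD x ((j : Int) - (nn : Int)) 0
        = ((x.drop (j + 1 - nn)).take nn).sum := by
      rw [hd, PySem.List.pyGetD_natCast, PySem.List.pyGetD_natCast,
        List.getD_eq_getElem x 0 hjl, List.getD_eq_getElem x 0 hjn,
        pvWindow_sum, pvWindow_sum]
      have h1 : j - nn + nn = j := by omega
      have h2 : j + 1 - nn + nn = j + 1 := by omega
      have h3 : j + 1 - nn = (j - nn) + 1 := by omega
      rw [h1, h2, h3, pvS_succ x j hjl, pvS_succ x (j - nn) hjn]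
      ring
    simp only [List.foldl_cons, List.foldl_nil, hs]
    rw [show j + 1 - nn = j - nn + 1 from by omega, List.range_succ, List.map_append]
    simp [pvWin]
    rw [List.range_succ, List.map_append, List.range_succ, List.map_append]
    simp [pvWin]

-- ===== VERDICT (by name: the statement is the Claim_ definition above) =====
theorem numpy_assignment_spec : Claim_equal_numpy_assignment := by
  intro x n _ hpre
  unfold Pre_numpy_assignment at hpre
  obtain ⟨nn, rfl⟩ : ∃ nn : Nat, n = (nn : Int) :=
    ⟨n.toNat, (Int.toNat_of_nonneg (by omega)).symm⟩
  have hnn : 1 ≤ nn := by exact_mod_cast hpre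
  unfold Spec_numpy_assignment numpy_assignment numpy_assignment_alt
  by_cases hle : nn ≤ x.length
  · rw [if_neg (by push_cast; omega)]
    have hb := pvBLoop_eq x nn hnn x.length hle (le_refl _)
    rw [PySem.List.slice_to_natCast] at *
    simp only [hb]
    have hx0 : x = x.drop 0 ++ x.take 0 := by simp
    have ha := pvALoop_eq x nn hnn hle (x.length + ((nn : Int)).natAbs + 1) 0 []
      (by omega) (by simp; omega)
    rw [← hx0] at ha
    simp only [Int.natCast_zero] at ha
    rw [ha]
    rw [List.range_eq_range']
    simp
  · rw [if_pos (by push_cast; omega)]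
    exact pvALoop_stop _ _ _ _ _ (by push_cast; omega)
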